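-- pv_equiv track=rewrite | github.com/dfacoet/aoc-python | 2017/2017-10_solution.py | part1
-- ===== SOURCE A (Python) =====
-- import operator
-- from functools import reduce
--
-- class Knot:
--     def __init__(self, size: int) -> None:
--         self.n = size
--         self.knot = list(range(size))
--
--     def reverse(self, start: int, length: int) -> None:
--         if length >= self.n:
--             # NOTE: length == self.n could be valid but is not used in this puzzle
--             raise ValueError("Length cannot be greater than size of knot")
--         start %= self.n
--         if (stop := start + length) > self.n:
--             stop %= self.n
--         if start < stop:
--             end = start - 1 if start > 0 else None
--             self.knot[start:stop] = self.knot[stop - 1 : end : -1]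
--         elif start > stop:
--             reversed = (self.knot[start:] + self.knot[:stop])[::-1]
--             self.knot[start:] = reversed[: self.n - start]
--             self.knot[:stop] = reversed[self.n - start :]
--
--     def __repr__(self) -> str:
--         return f"Knot({self.knot})"
--
--     def dense_hash(self) -> list[int]:
--         hash_ints = [
--             reduce(operator.xor, self.knot[16 * i : 16 * (i + 1)])
--             for i in range(self.n // 16)
--         ]
--         hash_str = "".join(f"{n:02x}" for n in hash_ints)
--         assert len(hash_str) == 32
--         return hash_str
--
-- def part1(puzzle_input: list[int]) -> int:
--     n = 256
--     knot = Knot(n)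
--     i = 0
--     s = 0
--     for length in puzzle_input:
--         knot.reverse(i, length)
--         i = i + length + s
--         s = s + 1
--     return knot.knot[0] * knot.knot[1]
-- ===== SOURCE B (Python) =====
-- def part1(puzzle_input):
--     n = 256
--     a = list(range(n))
--     shift = 0  # how far `a` is rotated left relative to the real ring
--     for s, length in enumerate(puzzle_input):
--         if not 0 <= length < n:
--             raise ValueError("Length must be in range(size of knot)")
--         if length > 0:
--             a = a[:length][::-1] + a[length:]
--         step = (length + s) % n
--         a = a[step:] + a[:step]
--         shift = (shift + step) % n
--     a = a[n - shift:] + a[:n - shift]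
--     return a[0] * a[1]
-- ===== Notes on version B (the rewrite author's own statement) =====
-- stated objective: alternative
-- what changed: B drops the Knot class and its three-way slice-assignment reversal: it keeps the current position at index 0 by rotating the list after each round, so every reversal is a plain prefix reversal, and one final rotation restores the ring before multiplying the first two entries; B also validates 0 <= length < 256 up front.
-- outside the precondition, e.g. on part1([-3]): A returns 63252, B raises ValueError
import Mathlib
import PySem

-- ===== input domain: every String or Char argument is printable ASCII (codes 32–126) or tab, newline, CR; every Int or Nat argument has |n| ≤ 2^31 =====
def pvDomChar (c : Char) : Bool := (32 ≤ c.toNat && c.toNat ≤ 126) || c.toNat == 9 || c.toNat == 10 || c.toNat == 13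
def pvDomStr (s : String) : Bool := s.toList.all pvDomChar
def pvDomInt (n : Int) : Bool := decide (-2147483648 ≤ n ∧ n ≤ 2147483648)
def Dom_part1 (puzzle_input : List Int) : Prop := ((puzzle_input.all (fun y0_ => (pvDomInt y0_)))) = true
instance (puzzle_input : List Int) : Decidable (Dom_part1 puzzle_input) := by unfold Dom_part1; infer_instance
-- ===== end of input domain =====

-- B replaces A's Knot class and slice-assignment circular reversal by a rotation-based
-- simulation (the current position is kept at index 0, so every reversal is a plain
-- prefix reversal); objective: alternative decomposition, same cost.

-- ===== PORT A =====
/-- `Knot.reverse` (size `n`): `none` exactly where Python raises ValueError. -/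
def knotReverse (n : Int) (knot : List Int) (start₀ len : Int) : Option (List Int) :=
  if len ≥ n then none
  else
    let start := PySem.Int.mod start₀ n
    let stop₀ := start + len
    let stop := if stop₀ > n then PySem.Int.mod stop₀ n else stop₀
    if start < stop then
      -- self.knot[start:stop] = self.knot[stop - 1 : end : -1], end = start-1 if start > 0 else None
      let rev := (PySem.List.slice? knot (some (stop - 1))
                    (if start > 0 then some (start - 1) else none) (-1)).getD []
      some (PySem.List.slice knot none (some start) ++ rev ++ PySem.List.slice knot (some stop) none)
    else if start > stop then
      -- reversed = (self.knot[start:] + self.knot[:stop])[::-1]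
      let revd := (PySem.List.slice? (PySem.List.slice knot (some start) none
                    ++ PySem.List.slice knot none (some stop)) none none (-1)).getD []
      -- self.knot[start:] = reversed[: self.n - start]
      let k1 := PySem.List.slice knot none (some start) ++ PySem.List.slice revd none (some (n - start))
      -- self.knot[:stop] = reversed[self.n - start :]
      some (PySem.List.slice revd (some (n - start)) none ++ PySem.List.slice k1 (some stop) none)
    else some knot

def part1 (puzzle_input : List Int) : Int :=
  let n : Int := 256
  let st := puzzle_input.foldl
    (fun (st : Option (List Int) × Int × Int) len =>
      match st with
      | (none, i, s) => (none, i, s)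
      | (some knot, i, s) => (knotReverse n knot i len, i + len + s, s + 1))
    (some (PySem.List.pyRange 0 n 1), 0, 0)
  match st.1 with
  | some knot => (PySem.List.pyGet? knot 0).getD 0 * (PySem.List.pyGet? knot 1).getD 0
  | none => 0

-- ===== PORT B =====
def part1_alt (puzzle_input : List Int) : Int :=
  let n : Int := 256
  let st := (PySem.List.enumerate puzzle_input 0).foldl
    (fun (st : Option (List Int) × Int) (p : Int × Int) =>
      match st with
      | (none, shift) => (none, shift)
      | (some a, shift) =>
        let s := p.1
        let len := p.2
        if len < 0 ∨ len ≥ n then (none, shift)   -- raise ValueError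
        else
          let a := if len > 0 then
              (PySem.List.slice? (PySem.List.slice a none (some len)) none none (-1)).getD []
                ++ PySem.List.slice a (some len) none
            else a
          let step := PySem.Int.mod (len + s) n
          let a := PySem.List.slice a (some step) none ++ PySem.List.slice a none (some step)
          (some a, PySem.Int.mod (shift + step) n))
    (some (PySem.List.pyRange 0 n 1), 0)
  match st.1 with
  | some a =>
    let a := PySem.List.slice a (some (n - st.2)) none ++ PySem.List.slice a none (some (n - st.2))
    (PySem.List.pyGet? a 0).getD 0 * (PySem.List.pyGet? a 1).getD 0
  | none => 0

-- ===== PRECONDITION & SPEC =====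
-- Pre_ excludes the inputs on which A raises ValueError (some length ≥ 256) and the
-- inputs with a negative length, where A's returned value is an accident of Python's
-- negative-slice clamping and B's range validation raises ValueError instead.
def Pre_part1 (puzzle_input : List Int) : Prop := ∀ x ∈ puzzle_input, 0 ≤ x ∧ x < 256
instance (puzzle_input : List Int) : Decidable (Pre_part1 puzzle_input) := by
  unfold Pre_part1; infer_instance
def pvWitness_part1 : List Int := [3, 4, 1, 5]

def Spec_part1 (puzzle_input : List Int) (out : Int) : Prop := out = part1_alt puzzle_input
instance (puzzle_input : List Int) (out : Int) : Decidable (Spec_part1 puzzle_input out) := by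
  unfold Spec_part1; infer_instance

-- ===== CLAIM (what is proved, stated in full; the proofs are below) =====
def Claim_equal_part1 : Prop := ∀ (puzzle_input : List Int), Dom_part1 puzzle_input →
  Pre_part1 puzzle_input → Spec_part1 puzzle_input (part1 puzzle_input)

-- ===== LEMMAS AND PROOFS =====

lemma revseg (xs : List Int) (a b : Nat) (hab : a < b) (hb : b ≤ xs.length) :
    List.filterMap (fun k : Nat => xs[((b:Int) - 1 + -(k:Int)).toNat]?) (List.range (b-a))
    = ((xs.drop a).take (b-a)).reverse := by
  rw [show (List.filterMap (fun k : Nat => xs[((b:Int) - 1 + -(k:Int)).toNat]?) (List.range (b-a))) = (List.range (b-a)).map (fun k => xs.getD (b - 1 - k) 0) from List.filterMap_eq_map_iff_forall_eq_some.mpr ?_]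
  · have hlt : (List.take (b-a) (List.drop a xs)).length = b - a := by simp; omega
    apply List.ext_getElem
    · simp; omega
    · intro j h1 h2
      simp only [List.getElem_map, List.getElem_range, List.getElem_reverse,
        List.getElem_take, List.getElem_drop, List.getD_eq_getElem?_getD]
      simp at h1 h2
      rw [List.getElem?_eq_getElem (by omega)]
      simp only [Option.getD_some]
      congr 1
      simp only [hlt] at *
      omega
  · intro k hk
    simp only [List.mem_range] at hk
    have ht : ((b:Int) - 1 + -(k:Int)).toNat = b - 1 - k := by omega
    rw [ht, List.getD_eq_getElem?_getD, List.getElem?_eq_getElem (by omega)]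
    simp

lemma slice_neg_one_rev (xs : List Int) (a b : Nat) (hab : a < b) (hb : b ≤ xs.length) :
    PySem.List.slice? xs (some ((b : Int) - 1))
      (if (a : Int) > 0 then some ((a : Int) - 1) else none) (-1)
    = some ((xs.drop a).take (b - a)).reverse := by
  unfold PySem.List.slice? PySem.List.sliceIndices
  rw [if_neg (by norm_num : ¬ (-1 : Int) = 0)]
  have h1 : (if ((b:Int)-1) < 0 then max ((b:Int)-1 + (xs.length:Int)) (if (-1:Int) < 0 then -1 else 0)
      else min ((b:Int)-1) (if (-1:Int) < 0 then (xs.length:Int) - 1 else (xs.length:Int))) = (b:Int) - 1 := by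
    rw [if_neg (by omega), if_pos (by norm_num)]; omega
  norm_num
  have hstart : (if b = 0 then max ((b:Int) - 1 + (xs.length:Int)) (-1) else min ((b:Int) - 1) ((xs.length:Int) - 1)) = (b:Int) - 1 := by
    rw [if_neg (by omega)]; omega
  rw [hstart]
  have hcnt : ((b:Int) - 1 - ((a:Int) - 1)).toNat = b - a := by omega
  by_cases ha : 0 < a
  · rw [if_pos ha]
    simp only []
    rw [if_neg (by omega : ¬ ((a:Int) - 1) < 0), show min ((a:Int)-1) ((xs.length:Int)-1) = (a:Int)-1 by omega,
      if_pos (by omega : ((a:Int) - 1) < (b:Int) - 1), hcnt]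
    exact revseg xs a b hab hb
  · have ha0 : a = 0 := by omega
    subst ha0
    rw [if_neg ha]
    simp only []
    rw [if_pos (by omega : (-1:Int) < (b:Int) - 1)]
    norm_num
    simpa using revseg xs 0 b hab hb

lemma stepA (knot : List Int) (hk : knot.length = 256) (i len : Int)
    (h0 : 0 ≤ len) (h1 : len < 256) :
    ∃ r, knotReverse 256 knot i len = some r ∧ r.length = 256 ∧
      r.rotate (PySem.Int.mod i 256).toNat =
        ((knot.rotate (PySem.Int.mod i 256).toNat).take len.toNat).reverse
          ++ (knot.rotate (PySem.Int.mod i 256).toNat).drop len.toNat := by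
  have hmn : (0:Int) < 256 := by norm_num
  have hp0 : 0 ≤ PySem.Int.mod i 256 := PySem.Int.mod_nonneg i hmn
  have hp1 : PySem.Int.mod i 256 < 256 := PySem.Int.mod_lt i hmn
  obtain ⟨P, hPi, hP256⟩ : ∃ P : Nat, PySem.Int.mod i 256 = (P:Int) ∧ P < 256 :=
    ⟨(PySem.Int.mod i 256).toNat, by omega, by omega⟩
  obtain ⟨L, hLi, hL256⟩ : ∃ L : Nat, len = (L:Int) ∧ L < 256 :=
    ⟨len.toNat, by omega, by omega⟩
  have hrotk : knot.rotate P = knot.drop P ++ knot.take P :=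
    List.rotate_eq_drop_append_take (by omega)
  rw [hPi, hLi]
  simp only [Int.toNat_natCast]
  simp only [knotReverse]
  rw [hPi]
  rw [if_neg (by omega : ¬ ((L:Int) ≥ 256))]
  by_cases hc : ((P:Int) + (L:Int)) > 256
  case neg =>
    rw [if_neg hc]
    by_cases hL0 : L = 0
    · subst hL0
      rw [if_neg (by omega : ¬ ((P:Int) < (P:Int) + (0:Nat))), if_neg (by omega : ¬ ((P:Int) > (P:Int) + (0:Nat)))]
      exact ⟨knot, rfl, hk, by simp⟩
    · rw [if_pos (by omega : ((P:Int) < (P:Int) + (L:Int)))]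
      have hrev := slice_neg_one_rev knot P (P + L) (by omega) (by omega)
      push_cast at hrev
      rw [hrev, Option.getD_some]
      rw [PySem.List.slice_to_natCast]
      have hPL : (P:Int) + (L:Int) = ((P + L : Nat) : Int) := by push_cast; ring
      rw [hPL, PySem.List.slice_from_natCast]
      have hA1 : (knot.take P).length = P := by simp [hk]; omega
      have hA2 : (((knot.drop P).take (P + L - P)).reverse).length = L := by simp [hk]; omega
      have hlen : (knot.take P ++ ((knot.drop P).take (P + L - P)).reverse ++ knot.drop (P + L)).length = 256 := by
        simp [hk]; omega
      refine ⟨_, rfl, hlen, ?_⟩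
      rw [List.rotate_eq_drop_append_take (by rw [hlen]; omega), hrotk]
      rw [List.drop_append_of_le_length (by rw [List.length_append, hA1, hA2]; omega)]
      rw [List.take_append_of_le_length (by rw [List.length_append, hA1, hA2]; omega)]
      rw [List.drop_left' hA1, List.take_left' hA1]
      rw [List.take_append_of_le_length (by simp [hk]; omega)]
      rw [List.drop_append_of_le_length (by simp [hk]; omega)]
      rw [List.drop_drop]
      rw [Nat.add_sub_cancel_left]
      simp [List.append_assoc]
  case pos =>
    rw [if_pos hc]
    have hS : PySem.Int.mod ((P:Int) + (L:Int)) 256 = ((P + L - 256 : Nat) : Int) := by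
      rw [PySem.Int.mod_eq_emod_of_pos hmn]; omega
    rw [hS]
    rw [if_neg (by omega : ¬ ((P:Int) < ((P + L - 256 : Nat) : Int)))]
    rw [if_pos (by omega : ((P:Int) > ((P + L - 256 : Nat) : Int)))]
    have h256P : (256:Int) - (P:Int) = ((256 - P : Nat) : Int) := by omega
    rw [h256P]
    simp only [PySem.List.slice_to_natCast, PySem.List.slice_from_natCast,
      PySem.List.slice?_none_none_neg_one, Option.getD_some]
    set S : Nat := P + L - 256 with hSd
    set R : List Int := (knot.drop P ++ knot.take S).reverse with hRd
    have hRlen : R.length = L := by simp [hRd, hk]; omega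
    have hX : (R.drop (256 - P)).length = S := by simp [hRlen]; omega
    have hY : ((knot.take P).drop S).length = P - S := by simp [hk]; omega
    have hZ : (R.take (256 - P)).length = 256 - P := by simp [hRlen]; omega
    have hk1 : (knot.take P ++ R.take (256 - P)).drop S
        = (knot.take P).drop S ++ R.take (256 - P) :=
      List.drop_append_of_le_length (by simp [hk]; omega)
    rw [hk1]
    have hlen : (R.drop (256 - P) ++ ((knot.take P).drop S ++ R.take (256 - P))).length = 256 := by
      simp only [List.length_append, hX, hY, hZ]; omega
    refine ⟨_, rfl, hlen, ?_⟩
    rw [List.rotate_eq_drop_append_take (by rw [hlen]; omega), hrotk]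
    -- LHS: drop P / take P of (X ++ (Y ++ Z))
    rw [List.drop_append, List.take_append]
    rw [List.drop_of_length_le (l := R.drop (256 - P)) (i := P) (by rw [hX]; omega)]
    rw [List.take_of_length_le (l := R.drop (256 - P)) (i := P) (by rw [hX]; omega)]
    rw [hX]
    rw [List.drop_append, List.take_append]
    rw [List.drop_of_length_le (l := (knot.take P).drop S) (i := P - S) (by rw [hY])]
    rw [List.take_of_length_le (l := (knot.take P).drop S) (i := P - S) (by rw [hY])]
    rw [hY, show P - S - (P - S) = 0 by omega]
    simp only [List.take_zero, List.drop_zero, List.nil_append, List.append_nil]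
    -- RHS: take L / drop L of (drop P knot ++ take P knot)
    rw [List.take_append, List.drop_append]
    rw [List.take_of_length_le (l := knot.drop P) (i := L) (by simp [hk]; omega)]
    rw [List.drop_of_length_le (l := knot.drop P) (i := L) (by simp [hk]; omega)]
    have hL6 : L - (knot.drop P).length = S := by simp [hk]; omega
    rw [hL6, List.take_take, show min S P = S by omega]
    simp only [List.nil_append]
    rw [← hRd]
    rw [← List.append_assoc, List.take_append_drop]

lemma loop_inv (l : List Int) (knot : List Int) (i s : Int)
    (hk : knot.length = 256) (hx : ∀ x ∈ l, 0 ≤ x ∧ x < 256) :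
    ∃ knot' i',
      l.foldl
        (fun (st : Option (List Int) × Int × Int) len =>
          match st with
          | (none, i, s) => (none, i, s)
          | (some knot, i, s) => (knotReverse 256 knot i len, i + len + s, s + 1))
        (some knot, i, s) = (some knot', i', s + l.length) ∧ knot'.length = 256 ∧
      (PySem.List.enumerate l s).foldl
        (fun (st : Option (List Int) × Int) (p : Int × Int) =>
          match st with
          | (none, shift) => (none, shift)
          | (some a, shift) =>
            let s := p.1
            let len := p.2
            if len < 0 ∨ len ≥ (256 : Int) then (none, shift)
            else
              let a := if len > 0 then
                  (PySem.List.slice? (PySem.List.slice a none (some len)) none none (-1)).getD []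
                    ++ PySem.List.slice a (some len) none
                else a
              let step := PySem.Int.mod (len + s) 256
              let a := PySem.List.slice a (some step) none ++ PySem.List.slice a none (some step)
              (some a, PySem.Int.mod (shift + step) 256))
        (some (knot.rotate (PySem.Int.mod i 256).toNat), PySem.Int.mod i 256)
      = (some (knot'.rotate (PySem.Int.mod i' 256).toNat), PySem.Int.mod i' 256) := by
  induction l generalizing knot i s with
  | nil => exact ⟨knot, i, by simp, hk, by simp [PySem.List.enumerate]⟩
  | cons x t ih =>
    obtain ⟨hx0, hx1⟩ := hx x (by simp)
    obtain ⟨r, hr, hrlen, hrot⟩ := stepA knot hk i x hx0 hx1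
    have hmn : (0:Int) < 256 := by norm_num
    -- B's one step sends (some (knot.rotate P), mod i 256) to (some (r.rotate P'), mod (i+x+s) 256)
    have hstep : PySem.Int.mod ((PySem.Int.mod i 256) + PySem.Int.mod (x + s) 256) 256
        = PySem.Int.mod (i + x + s) 256 := by
      simp only [PySem.Int.mod_eq_emod_of_pos hmn]
      omega
    have harot : (knot.rotate (PySem.Int.mod i 256).toNat).length = 256 := by
      simp [hk]
    have hT : (PySem.Int.mod (x + s) 256).toNat ≤ 256 := by
      have := PySem.Int.mod_lt (x + s) hmn
      have := PySem.Int.mod_nonneg (x + s) hmn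
      omega
    have hrotstep :
        ((((knot.rotate (PySem.Int.mod i 256).toNat).take x.toNat).reverse
            ++ (knot.rotate (PySem.Int.mod i 256).toNat).drop x.toNat)).rotate
              (PySem.Int.mod (x + s) 256).toNat
          = r.rotate (PySem.Int.mod (i + x + s) 256).toNat := by
      rw [← hrot, List.rotate_rotate]
      have h256 : r.length = 256 := hrlen
      have hmod : ((PySem.Int.mod i 256).toNat + (PySem.Int.mod (x + s) 256).toNat) % 256
          = (PySem.Int.mod (i + x + s) 256).toNat := by
        simp only [PySem.Int.mod_eq_emod_of_pos hmn]
        omega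
      rw [← List.rotate_mod, h256, hmod]
    obtain ⟨knot', i', hA, hlen', hB⟩ := ih r (i + x + s) (s + 1) hrlen
      (fun y hy => hx y (by simp [hy]))
    refine ⟨knot', i', ?_, hlen', ?_⟩
    · simp only [List.foldl_cons, hr, hA, List.length_cons]
      congr 1
      push_cast
      ring_nf
    · rw [show PySem.List.enumerate (x :: t) s = (s, x) :: PySem.List.enumerate t (s + 1) by
        simp [PySem.List.enumerate]]
      rw [List.foldl_cons]
      simp only []
      rw [if_neg (by omega : ¬ ((x:Int) < 0 ∨ x ≥ (256:Int)))]
      have hbody : (if x > 0 then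
            (PySem.List.slice? (PySem.List.slice (knot.rotate (PySem.Int.mod i 256).toNat) none (some x)) none none (-1)).getD []
              ++ PySem.List.slice (knot.rotate (PySem.Int.mod i 256).toNat) (some x) none
          else (knot.rotate (PySem.Int.mod i 256).toNat))
          = ((knot.rotate (PySem.Int.mod i 256).toNat).take x.toNat).reverse
              ++ (knot.rotate (PySem.Int.mod i 256).toNat).drop x.toNat := by
        by_cases hx0' : x > 0
        · rw [if_pos hx0', PySem.List.slice_to _ hx0,
            PySem.List.slice?_none_none_neg_one, Option.getD_some,
            PySem.List.slice_from _ hx0]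
        · rw [if_neg hx0']
          have : x = 0 := by omega
          simp [this]
      rw [hbody]
      have hstep0 : 0 ≤ PySem.Int.mod (x + s) 256 := PySem.Int.mod_nonneg (x + s) hmn
      rw [PySem.List.slice_from _ hstep0, PySem.List.slice_to _ hstep0]
      rw [← List.rotate_eq_drop_append_take (by
        simp only [List.length_append, List.length_reverse, List.length_take,
          List.length_drop, harot]
        omega)]
      rw [hrotstep, hstep]
      exact hB

-- ===== VERDICT (by name: the statement is the Claim_ definition above) =====
set_option maxRecDepth 40000 in
theorem part1_spec : Claim_equal_part1 := by
  unfold Claim_equal_part1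
  intro l hdom hpre
  unfold Spec_part1
  unfold Pre_part1 at hpre
  have hx : ∀ x ∈ l, 0 ≤ x ∧ x < 256 := hpre
  unfold part1 part1_alt
  simp only []
  have hk0 : (PySem.List.pyRange 0 256 1).length = 256 := by decide
  obtain ⟨knot', i', hA, hlen', hB⟩ := loop_inv l (PySem.List.pyRange 0 256 1) 0 0 hk0 hx
  have h00 : PySem.Int.mod 0 256 = 0 := by decide
  rw [h00] at hB
  simp only [Int.toNat_zero, List.rotate_zero] at hB
  rw [hA, hB]
  simp only []
  have hmn : (0:Int) < 256 := by norm_num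
  have hp0 : 0 ≤ PySem.Int.mod i' 256 := PySem.Int.mod_nonneg i' hmn
  have hp1 : PySem.Int.mod i' 256 < 256 := PySem.Int.mod_lt i' hmn
  have hfinal : PySem.List.slice (knot'.rotate (PySem.Int.mod i' 256).toNat)
        (some (256 - PySem.Int.mod i' 256)) none
      ++ PySem.List.slice (knot'.rotate (PySem.Int.mod i' 256).toNat)
        none (some (256 - PySem.Int.mod i' 256)) = knot' := by
    rw [PySem.List.slice_from _ (by omega), PySem.List.slice_to _ (by omega)]
    rw [← List.rotate_eq_drop_append_take (by rw [List.length_rotate, hlen']; omega)]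
    rw [List.rotate_rotate]
    rw [← List.rotate_mod, hlen']
    rw [show ((PySem.Int.mod i' 256).toNat + (256 - PySem.Int.mod i' 256).toNat) % 256 = 0 by omega]
    exact List.rotate_zero knot'
  rw [hfinal]
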